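-- pv_equiv track=rewrite | github.com/magiskboy/my-practices | hackerrank/The Maximum Subarray.py | find_maximum_sequence
-- ===== SOURCE A (Python) =====
-- def find_maximum_sequence(a, low, high):
--     if low == high:
--         return a[low]
--     else:
--         mid = (low + high) // 2
--         s_left = find_maximum_sequence(a, low, mid)
--         s_right = find_maximum_sequence(a, mid + 1, high)
--         return max(s_left, s_right, s_left + s_right)
-- ===== SOURCE B (Python) =====
-- def find_maximum_sequence(a, low, high):
--     best = a[low]
--     total = 0
--     for i in range(low, high + 1):
--         x = a[i]
--         if x > best:
--             best = x
--         if x > 0: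
--             total += x
--     return total if total > 0 else best
-- ===== Notes on version B (the rewrite author's own statement) =====
-- stated objective: simpler
-- what changed: Replaces the divide-and-conquer recursion with a single linear scan that keeps the running maximum element and the sum of positive elements, returning the positive sum if it is positive and the maximum element otherwise.
import Mathlib
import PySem

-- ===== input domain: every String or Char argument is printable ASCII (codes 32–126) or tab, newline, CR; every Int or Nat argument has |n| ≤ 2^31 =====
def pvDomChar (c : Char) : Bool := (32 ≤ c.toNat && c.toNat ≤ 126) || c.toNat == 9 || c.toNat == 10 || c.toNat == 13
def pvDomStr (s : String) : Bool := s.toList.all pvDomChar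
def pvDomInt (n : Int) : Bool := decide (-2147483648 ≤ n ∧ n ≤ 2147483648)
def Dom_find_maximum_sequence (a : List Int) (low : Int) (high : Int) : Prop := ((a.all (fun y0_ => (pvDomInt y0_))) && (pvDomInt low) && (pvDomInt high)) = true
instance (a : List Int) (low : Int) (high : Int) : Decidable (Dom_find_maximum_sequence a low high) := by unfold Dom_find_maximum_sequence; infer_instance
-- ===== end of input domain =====

-- B replaces A's divide-and-conquer recursion by a single linear scan (running max element + sum of positives); objective: simpler.


-- ===== PORT A =====
-- Literal port of A's recursion; the final 'else 0' branch is only a totality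
-- guard for low > high, where the Python diverges (excluded by Pre_).
def find_maximum_sequence (a : List Int) (low : Int) (high : Int) : Int :=
  if low == high then (PySem.List.pyGet? a low).getD 0
  else if h : low < high then
    let mid := PySem.Int.floordiv (low + high) 2
    let s_left := find_maximum_sequence a low mid
    let s_right := find_maximum_sequence a (mid + 1) high
    max (max s_left s_right) (s_left + s_right)
  else 0
termination_by (high - low).toNat
decreasing_by
  · have := PySem.Int.floordiv_two_mid_bounds (le_of_lt h)
    have h2 : PySem.Int.floordiv (low + high) 2 < high := by
      have : PySem.Int.floordiv (low + high) 2 = (low + high) / 2 :=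
        PySem.Int.floordiv_eq_ediv_of_pos (by omega)
      omega
    omega
  · have := PySem.Int.floordiv_two_mid_bounds (le_of_lt h)
    omega

-- ===== PORT B =====
def find_maximum_sequence_alt (a : List Int) (low : Int) (high : Int) : Int :=
  let best0 := (PySem.List.pyGet? a low).getD 0
  let bt := (PySem.List.pyRange low (high + 1) 1).foldl
    (fun (bt : Int × Int) i =>
      let x := (PySem.List.pyGet? a i).getD 0
      ((if x > bt.1 then x else bt.1), (if x > 0 then bt.2 + x else bt.2)))
    (best0, 0)
  if bt.2 > 0 then bt.2 else bt.1

-- ===== PRECONDITION & SPEC =====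
-- Pre_ is exactly A's returning domain: a non-empty range low ≤ high whose
-- endpoints are valid (possibly negative) Python indices into a; outside it A
-- raises (IndexError, or RecursionError from the unbounded recursion when low > high).
def Pre_find_maximum_sequence (a : List Int) (low : Int) (high : Int) : Prop :=
  low ≤ high ∧ -(a.length : Int) ≤ low ∧ high < (a.length : Int)
instance (a : List Int) (low : Int) (high : Int) : Decidable (Pre_find_maximum_sequence a low high) := by unfold Pre_find_maximum_sequence; infer_instance
def pvWitness_find_maximum_sequence : List Int × Int × Int := ([3, -1, 4, -2], 0, 3)

def Spec_find_maximum_sequence (a : List Int) (low : Int) (high : Int) (out : Int) : Prop := out = find_maximum_sequence_alt a low high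
instance (a : List Int) (low : Int) (high : Int) (out : Int) : Decidable (Spec_find_maximum_sequence a low high out) := by unfold Spec_find_maximum_sequence; infer_instance

-- ===== CLAIM (what is proved, stated in full; the proofs are below) =====
def Claim_equal_find_maximum_sequence : Prop := ∀ (a : List Int) (low : Int) (high : Int), Dom_find_maximum_sequence a low high → Pre_find_maximum_sequence a low high → Spec_find_maximum_sequence a low high (find_maximum_sequence a low high)

-- ===== LEMMAS AND PROOFS =====

-- the value at index i, as both ports read it
def pvVal (a : List Int) (i : Int) : Int := (PySem.List.pyGet? a i).getD 0

-- sum of the positive values over indices [low, high]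
def pvPossum (a : List Int) (low high : Int) : Int :=
  if high < low then 0
  else pvPossum a low (high - 1) + (if pvVal a high > 0 then pvVal a high else 0)
termination_by (high - low + 1).toNat
decreasing_by omega

-- maximum value over indices [low, high] (value at low if the range is degenerate)
def pvMaxel (a : List Int) (low high : Int) : Int :=
  if high ≤ low then pvVal a low
  else max (pvMaxel a low (high - 1)) (pvVal a high)
termination_by (high - low).toNat
decreasing_by omega

theorem pvPossum_empty (a : List Int) (low high : Int) (h : high < low) :
    pvPossum a low high = 0 := by
  rw [pvPossum]; simp only [if_pos h]

theorem pvPossum_single (a : List Int) (i : Int) :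
    pvPossum a i i = if pvVal a i > 0 then pvVal a i else 0 := by
  rw [pvPossum]
  simp only [if_neg (by omega : ¬ i < i)]
  rw [pvPossum_empty a i (i - 1) (by omega)]
  omega

theorem pvMaxel_single (a : List Int) (i : Int) : pvMaxel a i i = pvVal a i := by
  rw [pvMaxel]; simp

theorem pvPossum_step (a : List Int) (low high : Int) (h : low ≤ high) :
    pvPossum a low high
      = pvPossum a low (high - 1) + (if pvVal a high > 0 then pvVal a high else 0) := by
  rw [pvPossum]; simp only [if_neg (by omega : ¬ high < low)]

theorem pvMaxel_step (a : List Int) (low high : Int) (h : low < high) :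
    pvMaxel a low high = max (pvMaxel a low (high - 1)) (pvVal a high) := by
  rw [pvMaxel]; simp only [if_neg (by omega : ¬ high ≤ low)]

theorem pvPossum_nonneg (a : List Int) (low high : Int) : 0 ≤ pvPossum a low high := by
  rw [pvPossum]
  split
  · omega
  · have := pvPossum_nonneg a low (high - 1)
    split <;> omega
termination_by (high - low + 1).toNat
decreasing_by omega

theorem pvMaxel_nonpos (a : List Int) (low high : Int) (hlh : low ≤ high)
    (h0 : pvPossum a low high = 0) : pvMaxel a low high ≤ 0 := by
  by_cases hd : high ≤ low
  · have he : high = low := le_antisymm hd hlh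
    subst he
    rw [pvPossum_single] at h0
    rw [pvMaxel_single]
    split at h0 <;> omega
  · rw [pvPossum_step a low high hlh] at h0
    have hnn := pvPossum_nonneg a low (high - 1)
    rw [pvMaxel_step a low high (by omega)]
    have hrec := pvMaxel_nonpos a low (high - 1) (by omega) (by split at h0 <;> omega)
    have : pvVal a high ≤ 0 := by split at h0 <;> omega
    omega
termination_by (high - low).toNat
decreasing_by omega

theorem pvPossum_split (a : List Int) (low mid high : Int) (hlm : low ≤ mid) (h : mid ≤ high) :
    pvPossum a low high = pvPossum a low mid + pvPossum a (mid + 1) high := by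
  by_cases he : high ≤ mid
  · have : mid = high := le_antisymm h he
    subst this
    rw [pvPossum_empty a (mid + 1) mid (by omega)]
    omega
  · have IH := pvPossum_split a low mid (high - 1) hlm (by omega)
    have h1 := pvPossum_step a low high (by omega)
    have h2 := pvPossum_step a (mid + 1) high (by omega)
    omega
termination_by (high - mid).toNat
decreasing_by omega

theorem pvMaxel_split (a : List Int) (low mid high : Int) (h1 : low ≤ mid) (h2 : mid < high) :
    pvMaxel a low high = max (pvMaxel a low mid) (pvMaxel a (mid + 1) high) := by
  by_cases he : high ≤ mid + 1
  · have hh : high = mid + 1 := by omega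
    subst hh
    rw [pvMaxel_step a low (mid + 1) (by omega), pvMaxel_single]
    have : mid + 1 - 1 = mid := by omega
    rw [this]
  · have IH := pvMaxel_split a low mid (high - 1) h1 (by omega)
    rw [pvMaxel_step a low high (by omega), IH,
        pvMaxel_step a (mid + 1) high (by omega), max_assoc]
termination_by (high - mid).toNat
decreasing_by omega

-- the common closed form: sum of positives if positive, else the maximum element
def pvClosed (a : List Int) (low high : Int) : Int :=
  if pvPossum a low high > 0 then pvPossum a low high else pvMaxel a low high

theorem find_maximum_sequence_eq_closed (a : List Int) (low high : Int) (h : low ≤ high) :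
    find_maximum_sequence a low high = pvClosed a low high := by
  rw [find_maximum_sequence]
  by_cases heq : low = high
  · subst heq
    simp only [beq_self_eq_true, if_pos]
    unfold pvClosed
    rw [pvPossum_single, pvMaxel_single]
    unfold pvVal
    split_ifs <;> omega
  · have hlt : low < high := lt_of_le_of_ne h heq
    simp only [beq_iff_eq, if_neg heq, dif_pos hlt]
    set mid := PySem.Int.floordiv (low + high) 2 with hmid
    have hb := PySem.Int.floordiv_two_mid_bounds (le_of_lt hlt)
    have hmlt : mid < high := by
      have : PySem.Int.floordiv (low + high) 2 = (low + high) / 2 :=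
        PySem.Int.floordiv_eq_ediv_of_pos (by omega)
      omega
    have IHl := find_maximum_sequence_eq_closed a low mid (by omega)
    have IHr := find_maximum_sequence_eq_closed a (mid + 1) high (by omega)
    rw [IHl, IHr]
    unfold pvClosed
    have hs := pvPossum_split a low mid high (by omega) (by omega)
    have hm := pvMaxel_split a low mid high (by omega) hmlt
    have hl0 := pvPossum_nonneg a low mid
    have hr0 := pvPossum_nonneg a (mid + 1) high
    by_cases hl : pvPossum a low mid > 0 <;> by_cases hr : pvPossum a (mid + 1) high > 0
    · simp only [if_pos hl, if_pos hr, if_pos (by omega : pvPossum a low high > 0)]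
      simp only [max_def]
      split_ifs <;> omega
    · have hrm := pvMaxel_nonpos a (mid + 1) high (by omega) (by omega)
      simp only [if_pos hl, if_neg hr, if_pos (by omega : pvPossum a low high > 0)]
      simp only [max_def]
      split_ifs <;> omega
    · have hlm := pvMaxel_nonpos a low mid (by omega) (by omega)
      simp only [if_neg hl, if_pos hr, if_pos (by omega : pvPossum a low high > 0)]
      simp only [max_def]
      split_ifs <;> omega
    · have hlm := pvMaxel_nonpos a low mid (by omega) (by omega)
      have hrm := pvMaxel_nonpos a (mid + 1) high (by omega) (by omega)
      simp only [if_neg hl, if_neg hr, if_neg (by omega : ¬ pvPossum a low high > 0)]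
      rw [hm]
      simp only [max_def]
      split_ifs <;> omega
termination_by (high - low).toNat
decreasing_by
  · omega
  · omega

theorem pvFold_invariant (a : List Int) (low high : Int) (h : low ≤ high) :
    (PySem.List.pyRange low (high + 1) 1).foldl
      (fun (bt : Int × Int) i =>
        let x := (PySem.List.pyGet? a i).getD 0
        ((if x > bt.1 then x else bt.1), (if x > 0 then bt.2 + x else bt.2)))
      ((PySem.List.pyGet? a low).getD 0, 0)
    = (pvMaxel a low high, pvPossum a low high) := by
  by_cases he : high ≤ low
  · have hh : low = high := le_antisymm h he
    subst hh
    have hr : PySem.List.pyRange low (low + 1) 1 = [low] := by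
      rw [PySem.List.pyRange_one_succ_right (by omega)]
      rw [PySem.List.pyRange_one]
      simp
    rw [hr]
    simp only [List.foldl_cons, List.foldl_nil]
    rw [pvMaxel_single, pvPossum_single]
    unfold pvVal
    simp only [Prod.mk.injEq]
    refine ⟨?_, ?_⟩ <;> split_ifs <;> omega
  · have IH := pvFold_invariant a low (high - 1) (by omega)
    have hr : PySem.List.pyRange low (high + 1) 1
        = PySem.List.pyRange low high 1 ++ [high] := by
      rw [PySem.List.pyRange_one_succ_right (by omega)]
    have hr2 : PySem.List.pyRange low high 1
        = PySem.List.pyRange low (high - 1 + 1) 1 := by norm_num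
    rw [hr, List.foldl_append, hr2, IH]
    simp only [List.foldl_cons, List.foldl_nil]
    rw [pvMaxel_step a low high (by omega), pvPossum_step a low high (by omega)]
    unfold pvVal
    simp only [Prod.mk.injEq, max_def]
    refine ⟨?_, ?_⟩ <;> split_ifs <;> omega
termination_by (high - low).toNat
decreasing_by omega

theorem find_maximum_sequence_alt_eq_closed (a : List Int) (low high : Int) (h : low ≤ high) :
    find_maximum_sequence_alt a low high = pvClosed a low high := by
  simp only [find_maximum_sequence_alt, pvFold_invariant a low high h, pvClosed]

-- ===== VERDICT (by name: the statement is the Claim_ definition above) =====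
theorem find_maximum_sequence_spec : Claim_equal_find_maximum_sequence := by
  intro a low high _hdom hpre
  unfold Spec_find_maximum_sequence
  rw [find_maximum_sequence_eq_closed a low high hpre.1,
      find_maximum_sequence_alt_eq_closed a low high hpre.1]
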